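-- pv_equiv track=rewrite | github.com/shekharupadhyay/cs580-query-project | code/problem2_yannakakis.py | yannakakis_line_join
-- ===== SOURCE A (Python) =====
-- from collections import defaultdict
-- from typing import List, Tuple
--
-- Tuple2 = Tuple[int, int]
--
-- TupleN = Tuple[int, ...]
--
-- def hash_join_generic(
--     left: List[TupleN],
--     right: List[TupleN],
--     left_key_index: int,
--     right_key_index: int,
-- ) -> List[TupleN]:
--
--     hash_right = defaultdict(list)
--     for t in right:
--         key = t[right_key_index]
--         hash_right[key].append(t)
--
--     result: List[TupleN] = []
--
--     for lt in left:
--         key = lt[left_key_index]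
--         if key in hash_right:
--             for rt in hash_right[key]:
--                 merged = lt + rt[:right_key_index] + rt[right_key_index + 1 :]
--                 result.append(merged)
--
--     return result
--
-- def forward_semijoin(relations: List[List[Tuple2]]) -> List[List[Tuple2]]:
--
--     k = len(relations)
--     # Make a copy to avoid mutating input directly
--     R = [list(rel) for rel in relations]
--
--
--     for i in range(k - 2, -1, -1):
--         right = R[i + 1]
--         # Collect the set of valid join keys from right's first attribute
--         valid_keys = {t[0] for t in right}  # A_{i+1} from R_{i+1}
--         # Filter R_i
--         left = R[i]
--         R[i] = [t for t in left if t[1] in valid_keys]  # keep tuples whose A_{i+1} is in valid_keys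
--
--     return R
--
-- def backward_semijoin(relations: List[List[Tuple2]]) -> List[List[Tuple2]]:
--
--     k = len(relations)
--     R = [list(rel) for rel in relations]
--
--     # From R_2 up to R_k
--     for i in range(1, k):
--         left = R[i - 1]
--
--         valid_keys = {t[1] for t in left}
--         right = R[i]
--
--         R[i] = [t for t in right if t[0] in valid_keys]
--
--     return R
--
-- def yannakakis_line_join(relations: List[List[Tuple2]]) -> List[TupleN]:
--
--     if not relations:
--         return []
--
--
--     R_fwd = forward_semijoin(relations)
--
--
--     R_red = backward_semijoin(R_fwd)
--
--
--     current: List[TupleN] = [tuple(t) for t in R_red[0]]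
--
--     if len(R_red) == 1:
--         return current
--
--     for i in range(1, len(R_red)):
--         next_rel = [tuple(t) for t in R_red[i]]
--         if not current or not next_rel:
--             return []
--
--         current = hash_join_generic(
--             current,
--             next_rel,
--             left_key_index=len(current[0]) - 1,
--             right_key_index=0,
--         )
--
--     return current
-- ===== SOURCE B (Python) =====
-- # Plain hash-join chain: the Yannakakis semijoin reduction passes are dropped
-- # (they only delete tuples that never reach the final join output and never
-- # change its order), and each join step builds a key -> second-components
-- # index directly instead of calling a generic positional hash-join helper.
-- def yannakakis_line_join(relations):
--     if not relations:
--         return []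
--     current = [tuple(t) for t in relations[0]]
--     for rel in relations[1:]:
--         if not current or not rel:
--             return []
--         index = {}
--         for a, b in rel:
--             index.setdefault(a, []).append(b)
--         current = [lt + (b,) for lt in current for b in index.get(lt[-1], ())]
--     return current
-- ===== Notes on version B (the rewrite author's own statement) =====
-- stated objective: simpler
-- what changed: B drops the forward/backward semijoin-reduction passes entirely (they only remove tuples that never reach the final join output and never change its order) and replaces the generic positional hash-join helper with a direct key->second-components index built per step, so the whole function is one fold of a hash join over the relation chain.
import Mathlib
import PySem

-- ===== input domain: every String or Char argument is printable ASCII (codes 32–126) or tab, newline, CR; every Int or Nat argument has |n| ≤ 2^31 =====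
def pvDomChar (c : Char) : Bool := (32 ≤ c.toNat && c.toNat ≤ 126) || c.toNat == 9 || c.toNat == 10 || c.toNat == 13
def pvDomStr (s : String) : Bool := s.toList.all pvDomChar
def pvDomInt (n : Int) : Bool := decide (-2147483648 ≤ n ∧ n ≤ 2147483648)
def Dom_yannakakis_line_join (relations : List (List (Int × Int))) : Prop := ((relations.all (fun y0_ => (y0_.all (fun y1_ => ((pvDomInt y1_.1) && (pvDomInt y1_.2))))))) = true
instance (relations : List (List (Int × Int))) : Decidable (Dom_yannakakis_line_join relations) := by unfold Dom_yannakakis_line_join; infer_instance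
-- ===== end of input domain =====

-- B drops the two Yannakakis semijoin-reduction passes and folds a direct
-- key->values hash-join over the chain (same return value; simpler).
-- A's pyGetD index accesses use default 0/[] only where Python's index is
-- always in range on the entry's inputs (all tuples in a joined relation
-- have equal length), so the ports are exact on the stated domain.


-- ===== PORT A =====

-- tuple(t) for a pair t
def pairToList (t : Int × Int) : List Int := [t.1, t.2]

def hash_join_generic (left right : List (List Int))
    (left_key_index right_key_index : Int) : List (List Int) :=
  let hash_right : PySem.Dict Int (List (List Int)) :=
    right.foldl (fun d t =>
      d.modify (PySem.List.pyGetD t right_key_index 0) [] (fun l => l ++ [t]))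
      PySem.Dict.empty
  left.foldl (fun result lt =>
    let key := PySem.List.pyGetD lt left_key_index 0
    if hash_right.contains key then
      (hash_right.getD key []).foldl (fun res rt =>
        res ++ [lt ++ PySem.List.slice rt none (some right_key_index)
                   ++ PySem.List.slice rt (some (right_key_index + 1)) none]) result
    else result) []

def forward_semijoin (relations : List (List (Int × Int))) : List (List (Int × Int)) :=
  let k : Int := PySem.List.len relations
  let R := relations.map (fun rel => rel)
  (PySem.List.pyRange (k - 2) (-1) (-1)).foldl (fun R i =>
    let right := PySem.List.pyGetD R (i + 1) []
    let valid_keys := PySem.Set.ofList (right.map (fun t => t.1))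
    let left := PySem.List.pyGetD R i []
    PySem.List.pySetD R i (left.filter (fun t => PySem.Set.contains valid_keys t.2))) R

def backward_semijoin (relations : List (List (Int × Int))) : List (List (Int × Int)) :=
  let k : Int := PySem.List.len relations
  let R := relations.map (fun rel => rel)
  (PySem.List.pyRange 1 k 1).foldl (fun R i =>
    let left := PySem.List.pyGetD R (i - 1) []
    let valid_keys := PySem.Set.ofList (left.map (fun t => t.2))
    let right := PySem.List.pyGetD R i []
    PySem.List.pySetD R i (right.filter (fun t => PySem.Set.contains valid_keys t.1))) R

-- the 'for i in range(1, len(R_red))' loop with its 'return []' early exit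
def yjoinLoop (R_red : List (List (Int × Int))) :
    List (List Int) → List Int → List (List Int)
  | current, [] => current
  | current, i :: rest =>
    let next_rel := (PySem.List.pyGetD R_red i []).map pairToList
    if current = [] ∨ next_rel = [] then []
    else yjoinLoop R_red
      (hash_join_generic current next_rel
        (PySem.List.len (PySem.List.pyGetD current 0 []) - 1) 0) rest

def yannakakis_line_join (relations : List (List (Int × Int))) : List (List Int) :=
  if relations = [] then []
  else
    let R_red := backward_semijoin (forward_semijoin relations)
    let current := (PySem.List.pyGetD R_red 0 []).map pairToList
    if PySem.List.len R_red = 1 then current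
    else yjoinLoop R_red current (PySem.List.pyRange 1 (PySem.List.len R_red) 1)

-- ===== PORT B =====

-- index.setdefault(a, []).append(b): the dict after the statement is exactly
-- 'modify a (default []) (· ++ [b])'
def altIndex (rel : List (Int × Int)) : PySem.Dict Int (List Int) :=
  rel.foldl (fun d t => d.modify t.1 [] (fun l => l ++ [t.2])) PySem.Dict.empty

def altLoop : List (List Int) → List (List (Int × Int)) → List (List Int)
  | current, [] => current
  | current, rel :: rest =>
    if current = [] ∨ rel = [] then []
    else altLoop
      (current.flatMap (fun lt =>
        ((altIndex rel).getD (PySem.List.pyGetD lt (-1) 0) []).map (fun b => lt ++ [b])))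
      rest

def yannakakis_line_join_alt (relations : List (List (Int × Int))) : List (List Int) :=
  match relations with
  | [] => []
  | r0 :: rest => altLoop (r0.map pairToList) rest

-- ===== PRECONDITION & SPEC =====
def Spec_yannakakis_line_join (relations : List (List (Int × Int))) (out : List (List Int)) : Prop := out = yannakakis_line_join_alt relations
instance (relations : List (List (Int × Int))) (out : List (List Int)) : Decidable (Spec_yannakakis_line_join relations out) := by unfold Spec_yannakakis_line_join; infer_instance

-- ===== CLAIM (what is proved, stated in full; the proofs are below) =====
def Claim_equal_yannakakis_line_join : Prop := ∀ (relations : List (List (Int × Int))), Dom_yannakakis_line_join relations → Spec_yannakakis_line_join relations (yannakakis_line_join relations)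


-- ===== LEMMAS AND PROOFS =====

-- canonical form of one join step: key of a tuple is its last element
def keyL (lt : List Int) : Int := PySem.List.pyGetD lt (-1) 0

def joinNL (cur : List (List Int)) (r : List (Int × Int)) : List (List Int) :=
  cur.flatMap (fun lt => (r.filter (fun t => t.1 == keyL lt)).map (fun t => lt ++ [t.2]))

def chain (cur : List (List Int)) (rs : List (List (Int × Int))) : List (List Int) :=
  rs.foldl joinNL cur

def keys0 (r : List (Int × Int)) : PySem.Set Int := PySem.Set.ofList (r.map (fun t => t.1))
def keys1 (r : List (Int × Int)) : PySem.Set Int := PySem.Set.ofList (r.map (fun t => t.2))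

-- the forward-semijoin pass as a structural recursion (right to left)
def G : List (List (Int × Int)) → List (List (Int × Int))
  | [] => []
  | [r] => [r]
  | r :: s :: rest =>
      (r.filter (fun t => PySem.Set.contains (keys0 ((G (s :: rest)).headI)) t.2)) :: G (s :: rest)

-- the backward-semijoin pass as a structural recursion (left to right)
def bwd : List (Int × Int) → List (List (Int × Int)) → List (List (Int × Int))
  | _, [] => []
  | prev, q :: rest =>
      (q.filter (fun t => PySem.Set.contains (keys1 prev) t.1)) ::
        bwd (q.filter (fun t => PySem.Set.contains (keys1 prev) t.1)) rest

theorem keyL_append (lt : List Int) (b : Int) : keyL (lt ++ [b]) = b := by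
  simp [keyL, PySem.List.pyGetD_neg_one_append_singleton]

theorem keyL_pairToList (t : Int × Int) : keyL (pairToList t) = t.2 := by
  simpa [pairToList] using keyL_append [t.1] t.2

theorem joinNL_nil_right (cur : List (List Int)) : joinNL cur [] = [] := by
  simp [joinNL]

theorem chain_nil_left (rs : List (List (Int × Int))) : chain [] rs = [] := by
  induction rs with
  | nil => rfl
  | cons r rest ih => simpa [chain, joinNL] using ih

theorem mem_joinNL {x : List Int} {cur : List (List Int)} {r : List (Int × Int)}
    (h : x ∈ joinNL cur r) : ∃ lt ∈ cur, ∃ t ∈ r, x = lt ++ [t.2] := by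
  simp only [joinNL, List.mem_flatMap, List.mem_map, List.mem_filter] at h
  obtain ⟨lt, hlt, t, ⟨ht, -⟩, rfl⟩ := h
  exact ⟨lt, hlt, t, ht, rfl⟩

-- bucket of a hash built by repeated d[g t].append(f t)
theorem dict_bucket {α β : Type} (g : α → Int) (f : α → β) (rel : List α)
    (d : PySem.Dict Int (List β)) (k : Int) :
    (rel.foldl (fun d t => d.modify (g t) [] (fun l => l ++ [f t])) d).getD k []
      = d.getD k [] ++ (rel.filter (fun t => g t == k)).map f := by
  induction rel generalizing d with
  | nil => simp
  | cons t rest ih =>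
    simp only [List.foldl_cons, List.filter_cons]
    by_cases hk : g t == k
    · have hk' : g t = k := by simpa using hk
      subst hk'
      rw [ih, PySem.Dict.getD_modify_self]
      simp
    · have hk' : k ≠ g t := by intro h; exact hk (by simp [h])
      rw [ih, PySem.Dict.getD_modify_of_ne _ _ _ hk']
      simp [hk]

theorem dict_bucket_empty {α β : Type} (g : α → Int) (f : α → β) (rel : List α) (k : Int) :
    (rel.foldl (fun d t => d.modify (g t) [] (fun l => l ++ [f t])) PySem.Dict.empty).getD k []
      = (rel.filter (fun t => g t == k)).map f := by
  simpa [PySem.Dict.getD] using dict_bucket g f rel PySem.Dict.empty k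

-- B's join step is joinNL
theorem altStep_eq (cur : List (List Int)) (rel : List (Int × Int)) :
    (cur.flatMap (fun lt =>
      ((altIndex rel).getD (PySem.List.pyGetD lt (-1) 0) []).map (fun b => lt ++ [b])))
      = joinNL cur rel := by
  unfold joinNL altIndex
  refine List.flatMap_congr (fun lt _ => ?_)
  rw [dict_bucket_empty (fun t : Int × Int => t.1) (fun t : Int × Int => t.2) rel]
  simp [keyL, List.map_map, Function.comp_def]

theorem altLoop_eq_chain (rs : List (List (Int × Int))) (cur : List (List Int)) :
    altLoop cur rs = chain cur rs := by
  induction rs generalizing cur with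
  | nil => rfl
  | cons rel rest ih =>
    simp only [altLoop]
    by_cases hc : cur = []
    · rw [if_pos (Or.inl hc), hc]
      exact (chain_nil_left (rel :: rest)).symm
    · by_cases hr : rel = []
      · rw [if_pos (Or.inr hr), hr]
        show ([] : List (List Int)) = chain cur ([] :: rest)
        show ([] : List (List Int)) = List.foldl joinNL (joinNL cur []) rest
        rw [joinNL_nil_right]
        exact (chain_nil_left rest).symm
      · rw [if_neg (by simp [hc, hr]), ih, altStep_eq]
        rfl

-- A's join step is joinNL, given all tuples in cur share a positive length
theorem AStep_eq (cur : List (List Int)) (r : List (Int × Int)) (n : Nat)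
    (hn : 1 ≤ n) (hlen : ∀ lt ∈ cur, lt.length = n) (hcur : cur ≠ []) :
    hash_join_generic cur (r.map pairToList)
      (PySem.List.len (PySem.List.pyGetD cur 0 []) - 1) 0 = joinNL cur r := by
  obtain ⟨c, cs, rfl⟩ := List.exists_cons_of_ne_nil hcur
  have hc0 : PySem.List.pyGetD (c :: cs) 0 [] = c := PySem.List.pyGetD_zero_cons c cs []
  have hkeyidx : (PySem.List.len c - 1 : Int) = ((n - 1 : Nat) : Int) := by
    have := hlen c (List.mem_cons_self); simp [PySem.List.len_eq, this]; omega
  unfold hash_join_generic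
  rw [hc0, hkeyidx]
  have hbucket : ∀ k : Int,
      ((r.map pairToList).foldl (fun d t =>
        d.modify (PySem.List.pyGetD t 0 0) [] (fun l => l ++ [t])) PySem.Dict.empty).getD k []
      = (r.filter (fun t => t.1 == k)).map pairToList := by
    intro k
    have h := dict_bucket (fun t : List Int => PySem.List.pyGetD t 0 0) (fun t => t)
      (r.map pairToList) PySem.Dict.empty k
    simp only [] at h
    rw [h]
    simp [PySem.Dict.getD, PySem.Dict.empty, PySem.Dict.get?, List.filter_map,
      Function.comp_def, pairToList, PySem.List.pyGetD_zero_cons]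
  rw [PySem.List.foldl_congr_mem (g := fun result lt =>
    result ++ (r.filter (fun t => t.1 == keyL lt)).map (fun t => lt ++ [t.2])) _ _ _ ?_]
  · rw [PySem.List.foldl_append_eq_flatMap]
    rfl
  · intro acc lt hlt
    have hkey : PySem.List.pyGetD lt ((n - 1 : Nat) : Int) 0 = keyL lt := by
      have hl := hlen lt hlt
      have hne : lt ≠ [] := by intro h; subst h; simp at hl; omega
      rw [PySem.List.pyGetD_natCast, keyL, PySem.List.pyGetD_neg_one lt 0 hne,
        List.getLast_eq_getElem, List.getD_eq_getElem _ _ (by omega)]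
      simp [hl]
    simp only [hkey, hbucket]
    by_cases hcont : (((r.map pairToList).foldl (fun d t =>
        d.modify (PySem.List.pyGetD t 0 0) [] (fun l => l ++ [t])) PySem.Dict.empty)).contains (keyL lt)
    · rw [if_pos hcont, PySem.List.foldl_append_singleton_eq_map]
      congr 1
      rw [List.map_map]
      refine List.map_congr_left (fun t ht => ?_)
      simp [pairToList, PySem.List.slice_to _ (le_refl (0:Int)), PySem.List.slice_from_one]
    · rw [if_neg hcont]
      have : ((r.map pairToList).foldl (fun d t =>
          d.modify (PySem.List.pyGetD t 0 0) [] (fun l => l ++ [t])) PySem.Dict.empty).getD (keyL lt) [] = [] := by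
        rw [PySem.Dict.getD, (PySem.Dict.get?_eq_none_iff_contains _ _).2 (by simpa using hcont)]
        rfl
      rw [hbucket] at this
      have : r.filter (fun t => t.1 == keyL lt) = [] := by
        cases h : r.filter (fun t => t.1 == keyL lt) with
        | nil => rfl
        | cons a b => rw [h] at this; simp [pairToList] at this
      rw [this]
      simp


-- A's index loop over range(1, len(R)) is chain with A's guards
theorem joinNL_len {cur : List (List Int)} {r : List (Int × Int)} {n : Nat}
    (hlen : ∀ lt ∈ cur, lt.length = n) :
    ∀ x ∈ joinNL cur r, x.length = n + 1 := by
  intro x hx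
  obtain ⟨lt, hlt, t, _, rfl⟩ := mem_joinNL hx
  simp [hlen lt hlt]

theorem yjoinLoop_eq_chain (R : List (List (Int × Int))) :
    ∀ (fuel j : Nat) (cur : List (List Int)) (n : Nat), 1 ≤ n →
    (∀ lt ∈ cur, lt.length = n) → fuel = R.length - j →
    yjoinLoop R cur (PySem.List.pyRange j (PySem.List.len R) 1) = chain cur (R.drop j) := by
  intro fuel
  induction fuel with
  | zero =>
    intro j cur n _ _ hfuel
    have hj : R.length ≤ j := by omega
    rw [PySem.List.pyRange_one_eq_nil (by simp [PySem.List.len_eq]; exact_mod_cast hj),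
      List.drop_eq_nil_of_le hj]
    rfl
  | succ fuel ih =>
    intro j cur n hn hlen hfuel
    have hj : j < R.length := by omega
    rw [PySem.List.pyRange_one_cons (by simp [PySem.List.len_eq]; exact_mod_cast hj)]
    rw [List.drop_eq_getElem_cons hj]
    show (let next_rel := (PySem.List.pyGetD R (j : Int) []).map pairToList
      if cur = [] ∨ next_rel = [] then []
      else yjoinLoop R (hash_join_generic cur next_rel
        (PySem.List.len (PySem.List.pyGetD cur 0 []) - 1) 0)
        (PySem.List.pyRange ((j : Int) + 1) (PySem.List.len R) 1)) = _
    have hR : PySem.List.pyGetD R (j : Int) [] = R[j] := by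
      rw [PySem.List.pyGetD_natCast, List.getD_eq_getElem _ _ hj]
    simp only [hR]
    by_cases hc : cur = []
    · rw [if_pos (Or.inl (by simp [hc]))]
      rw [hc]
      exact (chain_nil_left _).symm
    · by_cases hr : R[j] = []
      · rw [if_pos (Or.inr (by simp [hr]))]
        show ([] : List (List Int)) = List.foldl joinNL (joinNL cur R[j]) (R.drop (j + 1))
        rw [hr, joinNL_nil_right]
        exact (chain_nil_left _).symm
      · rw [if_neg (by simp [hc, hr])]
        rw [AStep_eq cur R[j] n hn hlen hc]
        have hcast : ((j : Int) + 1) = ((j + 1 : Nat) : Int) := by push_cast; ring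
        rw [hcast, ih (j + 1) (joinNL cur R[j]) (n + 1) (by omega) (joinNL_len hlen) (by omega)]
        rfl

theorem set_append_length {α : Type} (xs ys : List α) (y v : α) :
    (xs ++ y :: ys).set xs.length v = xs ++ v :: ys := by
  induction xs with
  | nil => rfl
  | cons x xt ih => simp [ih]
theorem getD_append_length {α : Type} (xs ys : List α) (y d : α) :
    (xs ++ y :: ys).getD xs.length d = y := by
  induction xs with
  | nil => rfl
  | cons x xt ih => simp

theorem length_G (qs : List (List (Int × Int))) : (G qs).length = qs.length := by
  induction qs with
  | nil => rfl
  | cons q rest ih =>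
    cases rest with
    | nil => rfl
    | cons s rs => simpa [G] using ih

-- one forward-pass invariant step: the fold over the remaining indices finishes G
theorem fwd_inv (R : List (List (Int × Int))) :
    ∀ i : Nat, i < R.length →
    (PySem.List.pyRange ((i : Int) - 1) (-1) (-1)).foldl (fun R i =>
      PySem.List.pySetD R i ((PySem.List.pyGetD R i []).filter (fun t =>
        PySem.Set.contains (PySem.Set.ofList ((PySem.List.pyGetD R (i + 1) []).map (fun t => t.1))) t.2)))
      (R.take i ++ G (R.drop i)) = G R := by
  intro i
  induction i with
  | zero => intro _; rw [PySem.List.pyRange_neg_one_eq_nil (by omega)]; simp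
  | succ i ih =>
    intro hi
    have hi' : i < R.length := by omega
    have hcast : ((i + 1 : Nat) : Int) - 1 = (i : Int) := by push_cast; ring
    rw [hcast, PySem.List.pyRange_neg_one_cons (by omega)]
    simp only [List.foldl_cons]
    have hdrop : R.drop (i + 1) = R[i + 1] :: R.drop (i + 2) := List.drop_eq_getElem_cons hi
    have hGne : G (R.drop (i + 1)) ≠ [] := by
      intro h
      have := length_G (R.drop (i + 1))
      rw [h] at this
      simp [List.length_drop] at this
      omega
    obtain ⟨g0, gs, hG0⟩ := List.exists_cons_of_ne_nil hGne
    have htl : (R.take (i + 1)).length = i + 1 := List.length_take_of_le (by omega)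
    have hst1 : PySem.List.pyGetD (R.take (i + 1) ++ G (R.drop (i + 1))) ((i : Int) + 1) []
        = g0 := by
      have hc : ((i : Int) + 1) = ((i + 1 : Nat) : Int) := by push_cast; ring
      rw [hc, PySem.List.pyGetD_natCast, hG0]
      have h := getD_append_length (R.take (i + 1)) gs g0 ([] : List (Int × Int))
      rw [htl] at h
      exact h
    have hst2 : PySem.List.pyGetD (R.take (i + 1) ++ G (R.drop (i + 1))) (i : Int) [] = R[i] := by
      rw [PySem.List.pyGetD_natCast,
        List.getD_eq_getElem _ _ (by rw [List.length_append, htl]; omega),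
        List.getElem_append_left (by rw [htl]; omega), List.getElem_take]
    rw [hst1, hst2]
    set v := R[i].filter (fun t => PySem.Set.contains (PySem.Set.ofList (g0.map (fun t => t.1))) t.2) with hv
    have hset : PySem.List.pySetD (R.take (i + 1) ++ G (R.drop (i + 1))) (i : Int) v
        = R.take i ++ G (R.drop i) := by
      rw [PySem.List.pySetD_natCast, List.take_succ_eq_append_getElem hi',
        List.append_assoc]
      have hs := set_append_length (R.take i) (G (R.drop (i + 1))) R[i] v
      rw [List.length_take_of_le (le_of_lt hi' : i ≤ R.length)] at hs
      rw [List.singleton_append, hs]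
      congr 1
      have hdropi : R.drop i = R[i] :: R.drop (i + 1) := List.drop_eq_getElem_cons hi'
      obtain ⟨d0, ds, hd⟩ : ∃ d0 ds, R.drop (i + 1) = d0 :: ds := by
        cases h : R.drop (i + 1) with
        | nil => rw [h] at hdrop; cases hdrop
        | cons a b => exact ⟨a, b, rfl⟩
      rw [hdropi, hd]
      have hGd : G (d0 :: ds) = g0 :: gs := by rw [← hd]; exact hG0
      simp only [G, hGd, List.headI, keys0]
      rw [hv]
    rw [hset]
    exact ih hi'

-- forward_semijoin computes G
theorem forward_eq_G (relations : List (List (Int × Int))) :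
    forward_semijoin relations = G relations := by
  unfold forward_semijoin
  simp only [List.map_id_fun', id]
  match relations with
  | [] =>
    rw [show (PySem.List.len ([] : List (List (Int × Int))) - 2 : Int) = -2 by
      simp [PySem.List.len_eq]]
    rw [PySem.List.pyRange_neg_one_eq_nil (by omega)]
    rfl
  | [r] =>
    rw [show (PySem.List.len [r] - 2 : Int) = -1 by simp [PySem.List.len_eq]]
    rw [PySem.List.pyRange_neg_one_eq_nil (by omega)]
    rfl
  | r :: s :: rest =>
    set R := r :: s :: rest with hR
    have hlen : 2 ≤ R.length := by simp [hR]
    have h1 : (PySem.List.len R - 2 : Int) = ((R.length - 1 : Nat) : Int) - 1 := by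
      simp [PySem.List.len_eq]; omega
    have h2 : R.take (R.length - 1) ++ G (R.drop (R.length - 1)) = R := by
      have hne : R ≠ [] := by simp [hR]
      rw [List.drop_length_sub_one hne]
      have hG1 : G [R.getLast hne] = [R.getLast hne] := by simp [G]
      rw [hG1, ← List.drop_length_sub_one hne]
      exact List.take_append_drop _ R
    have h3 := fwd_inv R (R.length - 1) (by omega)
    rw [h2] at h3
    rw [h1]
    exact h3

-- one backward-pass invariant step: the fold over the remaining indices finishes bwd
theorem bwd_inv :
    ∀ (rest done : List (List (Int × Int))) (h : done ≠ []),
    (PySem.List.pyRange (done.length : Int) ((done.length + rest.length : Nat) : Int) 1).foldl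
      (fun R i =>
        PySem.List.pySetD R i ((PySem.List.pyGetD R i []).filter (fun t =>
          PySem.Set.contains (PySem.Set.ofList ((PySem.List.pyGetD R (i - 1) []).map (fun t => t.2))) t.1)))
      (done ++ rest) = done ++ bwd (done.getLast h) rest := by
  intro rest
  induction rest with
  | nil =>
    intro done h
    rw [PySem.List.pyRange_one_eq_nil (by simp)]
    simp [bwd]
  | cons q rest ih =>
    intro done h
    have hdl : 1 ≤ done.length := by
      cases done with | nil => exact absurd rfl h | cons _ _ => simp
    rw [PySem.List.pyRange_one_cons (by simp)]
    simp only [List.foldl_cons]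
    have hget1 : PySem.List.pyGetD (done ++ q :: rest) ((done.length : Int) - 1) []
        = done.getLast h := by
      have hc : ((done.length : Int) - 1) = ((done.length - 1 : Nat) : Int) := by omega
      rw [hc, PySem.List.pyGetD_natCast,
        List.getD_eq_getElem _ _ (by rw [List.length_append]; omega),
        List.getElem_append_left (by omega), List.getLast_eq_getElem]
    have hget2 : PySem.List.pyGetD (done ++ q :: rest) (done.length : Int) [] = q := by
      rw [PySem.List.pyGetD_natCast, getD_append_length]
    rw [hget1, hget2]
    set b := q.filter (fun t =>
      PySem.Set.contains (PySem.Set.ofList ((done.getLast h).map (fun t => t.2))) t.1) with hb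
    have hset : PySem.List.pySetD (done ++ q :: rest) (done.length : Int) b
        = (done ++ [b]) ++ rest := by
      rw [PySem.List.pySetD_natCast, set_append_length]
      simp
    rw [hset]
    have hne : done ++ [b] ≠ [] := by simp
    have hlast : (done ++ [b]).getLast hne = b := List.getLast_concat
    have hcast : ((done.length : Int) + 1) = (((done ++ [b]).length : Nat) : Int) := by
      simp
    have hlen2 : ((done.length + (q :: rest).length : Nat) : Int)
        = (((done ++ [b]).length + rest.length : Nat) : Int) := by
      simp; omega
    rw [hcast, hlen2, ih (done ++ [b]) hne, hlast]
    simp only [List.append_assoc, List.singleton_append]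
    rw [hb]
    rfl

-- backward_semijoin computes bwd
theorem backward_eq_bwd (r0 : List (Int × Int)) (rest : List (List (Int × Int))) :
    backward_semijoin (r0 :: rest) = r0 :: bwd r0 rest := by
  unfold backward_semijoin
  simp only [List.map_id_fun', id]
  have h3 := bwd_inv rest [r0] (by simp)
  simp only [List.length_singleton, Nat.cast_one, List.singleton_append,
    List.getLast_singleton] at h3
  rw [show (PySem.List.len (r0 :: rest) : Int) = ((1 + rest.length : Nat) : Int) by
    simp [PySem.List.len_eq]; omega]
  exact h3

-- right relation may be pre-filtered by any predicate true on all matching keys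
theorem joinNL_filter_right (cur : List (List Int)) (r : List (Int × Int))
    (p : Int × Int → Bool)
    (h : ∀ lt ∈ cur, ∀ t ∈ r, t.1 = keyL lt → p t = true) :
    joinNL cur (r.filter p) = joinNL cur r := by
  unfold joinNL
  refine List.flatMap_congr (fun lt hlt => ?_)
  rw [List.filter_filter]
  congr 1
  refine List.filter_congr (fun t ht => ?_)
  by_cases hk : t.1 == keyL lt
  · simp [hk, h lt hlt t ht (by simpa using hk)]
  · simp [hk]

-- left side may be pre-filtered if dropped tuples match nothing
theorem joinNL_filter_left (cur : List (List Int)) (r : List (Int × Int))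
    (p : List Int → Bool)
    (h : ∀ lt ∈ cur, p lt = false → r.filter (fun t => t.1 == keyL lt) = []) :
    joinNL (cur.filter p) r = joinNL cur r := by
  unfold joinNL
  induction cur with
  | nil => rfl
  | cons lt rest ih =>
    have ih' := ih (fun x hx => h x (List.mem_cons_of_mem _ hx))
    by_cases hp : p lt
    · simp [hp, ih']
    · have := h lt (List.mem_cons_self) (by simpa using hp)
      simp [hp, ih', this]

-- a filter on the produced key commutes into the right relation
theorem filter_joinNL (cur : List (List Int)) (r : List (Int × Int)) (q : Int → Bool) :
    (joinNL cur r).filter (fun x => q (keyL x)) = joinNL cur (r.filter (fun t => q t.2)) := by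
  unfold joinNL
  rw [List.filter_flatMap]
  refine List.flatMap_congr (fun lt _ => ?_)
  rw [List.filter_map]
  have : ((fun x => q (keyL x)) ∘ fun t : Int × Int => lt ++ [t.2]) = fun t : Int × Int => q t.2 := by
    funext t; simp [keyL_append]
  rw [this, List.filter_comm]

-- T1: the backward pass does not change the chain
theorem chain_bwd (qs : List (List (Int × Int))) :
    ∀ (prev : List (Int × Int)) (cur : List (List Int)),
    (∀ x ∈ cur, keyL x ∈ prev.map (fun t => t.2)) →
    chain cur (bwd prev qs) = chain cur qs := by
  induction qs with
  | nil => intro _ _ _; rfl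
  | cons q rest ih =>
    intro prev cur hinv
    have hstep : joinNL cur (q.filter (fun t => PySem.Set.contains (keys1 prev) t.1))
        = joinNL cur q := by
      refine joinNL_filter_right cur q _ (fun lt hlt t ht hk => ?_)
      rw [PySem.Set.contains_iff]
      rw [keys1, PySem.Set.mem_ofList, hk]
      exact hinv lt hlt
    have hinv' : ∀ x ∈ joinNL cur (q.filter (fun t => PySem.Set.contains (keys1 prev) t.1)),
        keyL x ∈ (q.filter (fun t => PySem.Set.contains (keys1 prev) t.1)).map
          (fun t => t.2) := by
      intro x hx
      obtain ⟨lt, _, t, ht, rfl⟩ := mem_joinNL hx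
      rw [keyL_append]
      exact List.mem_map_of_mem ht
    calc chain cur (bwd prev (q :: rest))
        = chain (joinNL cur (q.filter (fun t => PySem.Set.contains (keys1 prev) t.1)))
            (bwd (q.filter (fun t => PySem.Set.contains (keys1 prev) t.1)) rest) := rfl
      _ = chain (joinNL cur (q.filter (fun t => PySem.Set.contains (keys1 prev) t.1))) rest :=
            ih _ _ hinv'
      _ = chain (joinNL cur q) rest := by rw [hstep]
      _ = chain cur (q :: rest) := rfl

-- T2 helper: current may be pre-filtered by the first reduced relation's keys
theorem filter_keys0_nil {r : List (Int × Int)} {lt : List Int}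
    (h : PySem.Set.contains (keys0 r) (keyL lt) = false) :
    r.filter (fun t => t.1 == keyL lt) = [] := by
  rw [List.filter_eq_nil_iff]
  intro t ht hk
  have : keyL lt ∈ keys0 r := by
    rw [keys0, PySem.Set.mem_ofList]
    exact (by simpa using hk : t.1 = keyL lt) ▸ List.mem_map_of_mem ht
  rw [(PySem.Set.contains_iff _ _).2 this] at h
  exact absurd h (by decide)

theorem chain_filter_headG (qs : List (List (Int × Int))) (hqs : qs ≠ []) :
    ∀ cur : List (List Int),
    chain (cur.filter (fun x => PySem.Set.contains (keys0 ((G qs).headI)) (keyL x))) qs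
      = chain cur qs := by
  induction qs with
  | nil => exact absurd rfl hqs
  | cons q rest ih =>
    intro cur
    cases rest with
    | nil =>
      show joinNL (cur.filter (fun x => PySem.Set.contains (keys0 ((G [q]).headI)) (keyL x))) q
        = joinNL cur q
      refine joinNL_filter_left cur q _ (fun lt _ hp => ?_)
      exact filter_keys0_nil (by simpa [G] using hp)
    | cons s rs =>
      have hrest : (s :: rs : List (List (Int × Int))) ≠ [] := by simp
      have hG : G (q :: s :: rs) =
          (q.filter (fun t => PySem.Set.contains (keys0 ((G (s :: rs)).headI)) t.2)) :: G (s :: rs) := rfl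
      set qG := q.filter (fun t => PySem.Set.contains (keys0 ((G (s :: rs)).headI)) t.2) with hqG
      have hstep : ∀ c : List (List Int),
          chain (joinNL c q) (s :: rs) = chain (joinNL c qG) (s :: rs) := by
        intro c
        have h1 := ih hrest (joinNL c q)
        have h2 : (joinNL c q).filter
            (fun x => PySem.Set.contains (keys0 ((G (s :: rs)).headI)) (keyL x)) = joinNL c qG := by
          rw [filter_joinNL, hqG]
        rw [← h1, h2]
      calc chain (cur.filter (fun x => PySem.Set.contains (keys0 ((G (q :: s :: rs)).headI)) (keyL x)))
              (q :: s :: rs)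
            = chain (joinNL (cur.filter (fun x => PySem.Set.contains (keys0 qG) (keyL x))) q)
                (s :: rs) := by rw [hG]; rfl
        _ = chain (joinNL (cur.filter (fun x => PySem.Set.contains (keys0 qG) (keyL x))) qG)
                (s :: rs) := hstep _
        _ = chain (joinNL cur qG) (s :: rs) := by
              congr 1
              refine joinNL_filter_left cur qG _ (fun lt _ hp => ?_)
              exact filter_keys0_nil hp
        _ = chain (joinNL cur q) (s :: rs) := (hstep cur).symm
        _ = chain cur (q :: s :: rs) := rfl

-- T2: the forward pass does not change the chain
theorem chain_G (qs : List (List (Int × Int))) :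
    ∀ cur : List (List Int), chain cur (G qs) = chain cur qs := by
  induction qs with
  | nil => intro cur; rfl
  | cons q rest ih =>
    intro cur
    cases rest with
    | nil => rfl
    | cons s rs =>
      have hrest : (s :: rs : List (List (Int × Int))) ≠ [] := by simp
      set qG := q.filter (fun t => PySem.Set.contains (keys0 ((G (s :: rs)).headI)) t.2) with hqG
      have hL : chain cur (G (q :: s :: rs)) = chain (joinNL cur qG) (G (s :: rs)) := rfl
      rw [hL, ih]
      show chain (joinNL cur qG) (s :: rs) = chain (joinNL cur q) (s :: rs)
      rw [← chain_filter_headG (s :: rs) hrest (joinNL cur q), filter_joinNL, ← hqG]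

theorem length_bwd (qs : List (List (Int × Int))) :
    ∀ prev, (bwd prev qs).length = qs.length := by
  induction qs with
  | nil => intro _; rfl
  | cons q rest ih => intro prev; simp [bwd, ih]

theorem main_eq (relations : List (List (Int × Int))) :
    yannakakis_line_join relations = yannakakis_line_join_alt relations := by
  match relations with
  | [] => rfl
  | [r0] =>
    show yannakakis_line_join [r0] = altLoop (r0.map pairToList) []
    unfold yannakakis_line_join
    rw [if_neg (by simp)]
    rw [forward_eq_G]
    rw [show G [r0] = [r0] by simp [G]]
    rw [backward_eq_bwd r0 []]
    show (if PySem.List.len [r0] = 1 then (PySem.List.pyGetD ([r0] : List (List (Int × Int))) 0 []).map pairToList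
      else _) = altLoop (r0.map pairToList) []
    rw [if_pos (by simp [PySem.List.len_eq])]
    rw [PySem.List.pyGetD_zero_cons]
    rfl
  | r0 :: s :: rs =>
    show yannakakis_line_join (r0 :: s :: rs) = altLoop (r0.map pairToList) (s :: rs)
    unfold yannakakis_line_join
    rw [if_neg (by simp)]
    rw [forward_eq_G]
    rw [show G (r0 :: s :: rs) =
      (r0.filter (fun t => PySem.Set.contains (keys0 ((G (s :: rs)).headI)) t.2)) :: G (s :: rs)
      from rfl]
    set F0 := r0.filter (fun t => PySem.Set.contains (keys0 ((G (s :: rs)).headI)) t.2) with hF0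
    rw [backward_eq_bwd F0 (G (s :: rs))]
    set Rr := F0 :: bwd F0 (G (s :: rs)) with hRr
    have hlenR : Rr.length = 2 + rs.length := by
      simp [hRr, length_bwd, length_G]; omega
    show (if PySem.List.len Rr = 1 then (PySem.List.pyGetD Rr 0 []).map pairToList
      else yjoinLoop Rr ((PySem.List.pyGetD Rr 0 []).map pairToList)
        (PySem.List.pyRange 1 (PySem.List.len Rr) 1)) = altLoop (r0.map pairToList) (s :: rs)
    rw [if_neg (by simp [PySem.List.len_eq, hlenR]; omega)]
    have hcur : PySem.List.pyGetD Rr 0 [] = F0 := by rw [hRr, PySem.List.pyGetD_zero_cons]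
    rw [hcur]
    have hL := yjoinLoop_eq_chain Rr (Rr.length - 1) 1 (F0.map pairToList) 2 (by omega)
      (by intro lt hlt; obtain ⟨t, _, rfl⟩ := List.mem_map.1 hlt; simp [pairToList]) (by omega)
    norm_num at hL
    rw [show (PySem.List.len Rr : Int) = (Rr.length : Int) from PySem.List.len_eq Rr, hL]
    rw [show Rr.tail = bwd F0 (G (s :: rs)) from rfl]
    rw [chain_bwd (G (s :: rs)) F0 (F0.map pairToList) (by
      intro x hx
      obtain ⟨t, ht, rfl⟩ := List.mem_map.1 hx
      rw [keyL_pairToList]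
      exact List.mem_map_of_mem ht)]
    rw [chain_G]
    have hfilt : F0.map pairToList
        = (r0.map pairToList).filter
            (fun x => PySem.Set.contains (keys0 ((G (s :: rs)).headI)) (keyL x)) := by
      rw [List.filter_map, hF0]
      congr 1
    rw [hfilt, chain_filter_headG (s :: rs) (by simp) (r0.map pairToList)]
    exact (altLoop_eq_chain (s :: rs) (r0.map pairToList)).symm

-- ===== VERDICT (by name: the statement is the Claim_ definition above) =====
theorem yannakakis_line_join_spec : Claim_equal_yannakakis_line_join := by
  unfold Claim_equal_yannakakis_line_join
  intro relations _
  unfold Spec_yannakakis_line_join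
  exact main_eq relations
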